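-- pv_equiv track=rewrite | github.com/khm1102/BOJ | 백준/Silver/28438. 행렬 연산 （행렬 계산하기）/행렬 연산 （행렬 계산하기）.py | matrix_operations
-- ===== SOURCE A (Python) =====
-- def matrix_operations(N, M, Q, operations):
--     matrix = [[0] * M for _ in range(N)]
--     row_sum = [0] * N
--     col_sum = [0] * M
--
--     for op in operations:
--         if op[0] == 1:
--             r, v = op[1], op[2]
--             row_sum[r - 1] += v
--         else:
--             c, v = op[1], op[2]
--             col_sum[c - 1] += v
--
--     for i in range(N):
--         for j in range(M):
--             matrix[i][j] = row_sum[i] + col_sum[j]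
--
--     return matrix
-- ===== SOURCE B (Python) =====
-- def matrix_operations(N, M, Q, operations):
--     # Apply each operation directly to the output matrix (no row_sum/col_sum tables).
--     matrix = [[0] * M for _ in range(N)]
--     for t, x, v in operations:
--         if t == 1:
--             matrix[x - 1] = [e + v for e in matrix[x - 1]]
--         else:
--             for i in range(N):
--                 matrix[i][x - 1] += v
--     return matrix
-- ===== Notes on version B (the rewrite author's own statement) =====
-- stated objective: alternative
-- what changed: B drops A's row_sum/col_sum tables and final N*M fill pass entirely: it allocates the zero matrix and applies each operation directly to it (a type-1 op rebuilds the target row with +v, a type-2 op adds v down the target column), exploiting that the final cell value is just the accumulated row and column increments.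
import Mathlib
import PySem

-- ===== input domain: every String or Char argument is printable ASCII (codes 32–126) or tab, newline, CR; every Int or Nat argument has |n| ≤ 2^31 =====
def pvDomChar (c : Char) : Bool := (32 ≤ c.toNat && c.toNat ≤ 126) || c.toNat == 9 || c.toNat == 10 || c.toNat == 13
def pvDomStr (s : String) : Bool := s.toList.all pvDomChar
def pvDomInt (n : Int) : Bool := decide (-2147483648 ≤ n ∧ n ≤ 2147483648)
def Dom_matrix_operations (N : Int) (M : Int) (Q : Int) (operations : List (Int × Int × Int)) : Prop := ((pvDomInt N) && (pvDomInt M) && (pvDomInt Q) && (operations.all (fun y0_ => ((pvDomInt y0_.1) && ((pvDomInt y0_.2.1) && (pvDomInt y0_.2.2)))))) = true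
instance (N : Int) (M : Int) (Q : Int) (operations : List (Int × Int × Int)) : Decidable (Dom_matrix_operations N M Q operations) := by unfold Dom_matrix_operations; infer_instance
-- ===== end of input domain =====

-- B drops A's row_sum/col_sum tables and final fill pass: each operation is applied directly
-- to the allocated zero matrix (objective: alternative; not faster).

-- ===== PORT A =====
def matrix_operations (N : Int) (M : Int) (Q : Int) (operations : List (Int × Int × Int)) : List (List Int) :=
  let matrix := List.replicate N.toNat (List.replicate M.toNat (0 : Int))
  let sums := operations.foldl
    (fun (s : List Int × List Int) op =>
      if op.1 == 1 then
        (PySem.List.pySetD s.1 (op.2.1 - 1) (PySem.List.pyGetD s.1 (op.2.1 - 1) 0 + op.2.2), s.2)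
      else
        (s.1, PySem.List.pySetD s.2 (op.2.1 - 1) (PySem.List.pyGetD s.2 (op.2.1 - 1) 0 + op.2.2)))
    (List.replicate N.toNat (0 : Int), List.replicate M.toNat (0 : Int))
  (PySem.List.pyRange 0 N 1).foldl
    (fun mat i =>
      PySem.List.pySetD mat i
        ((PySem.List.pyRange 0 M 1).foldl
          (fun row j => PySem.List.pySetD row j (PySem.List.pyGetD sums.1 i 0 + PySem.List.pyGetD sums.2 j 0))
          (PySem.List.pyGetD mat i [])))
    matrix

-- ===== PORT B =====
-- one operation applied in place to the matrix (the body of B's 'for t, x, v in operations' loop)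
def pvBOp (N : Int) (mat : List (List Int)) (op : Int × Int × Int) : List (List Int) :=
  if op.1 == 1 then
    PySem.List.pySetD mat (op.2.1 - 1)
      ((PySem.List.pyGetD mat (op.2.1 - 1) []).map (fun e => e + op.2.2))
  else
    (PySem.List.pyRange 0 N 1).foldl
      (fun mat2 i =>
        PySem.List.pySetD mat2 i
          (PySem.List.pySetD (PySem.List.pyGetD mat2 i []) (op.2.1 - 1)
            (PySem.List.pyGetD (PySem.List.pyGetD mat2 i []) (op.2.1 - 1) 0 + op.2.2)))
      mat

def matrix_operations_alt (N : Int) (M : Int) (Q : Int) (operations : List (Int × Int × Int)) : List (List Int) :=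
  operations.foldl (pvBOp N) (List.replicate N.toNat (List.replicate M.toNat (0 : Int)))

-- ===== PRECONDITION & SPEC =====
-- Pre_ excludes exactly the inputs on which A raises IndexError: some operation whose target
-- row (type-1 op) resp. column (other ops) index is out of range for A's sum tables.
def Pre_matrix_operations (N : Int) (M : Int) (Q : Int) (operations : List (Int × Int × Int)) : Prop :=
  ∀ op ∈ operations,
    (op.1 = 1 → -(N.toNat : Int) ≤ op.2.1 - 1 ∧ op.2.1 - 1 < (N.toNat : Int)) ∧
    (op.1 ≠ 1 → -(M.toNat : Int) ≤ op.2.1 - 1 ∧ op.2.1 - 1 < (M.toNat : Int))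
instance (N : Int) (M : Int) (Q : Int) (operations : List (Int × Int × Int)) : Decidable (Pre_matrix_operations N M Q operations) := by unfold Pre_matrix_operations; infer_instance

def pvWitness_matrix_operations : Int × Int × Int × (List (Int × Int × Int)) :=
  (2, 2, 2, [(1, 1, 5), (2, 2, 3)])

def Spec_matrix_operations (N : Int) (M : Int) (Q : Int) (operations : List (Int × Int × Int)) (out : List (List Int)) : Prop := out = matrix_operations_alt N M Q operations
instance (N : Int) (M : Int) (Q : Int) (operations : List (Int × Int × Int)) (out : List (List Int)) : Decidable (Spec_matrix_operations N M Q operations out) := by unfold Spec_matrix_operations; infer_instance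

-- ===== CLAIM (what is proved, stated in full; the proofs are below) =====
def Claim_equal_matrix_operations : Prop := ∀ (N : Int) (M : Int) (Q : Int) (operations : List (Int × Int × Int)), Dom_matrix_operations N M Q operations → Pre_matrix_operations N M Q operations → Spec_matrix_operations N M Q operations (matrix_operations N M Q operations)

-- ===== LEMMAS AND PROOFS =====

-- Python's normalized index for an in-range (possibly negative) index i into a list of length len
def pvNorm (len : Nat) (i : Int) : Nat := if 0 ≤ i then i.toNat else len - (-i).toNat

lemma pvNorm_lt (len : Nat) (i : Int) (h1 : -(len : Int) ≤ i) (h2 : i < (len : Int)) :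
    pvNorm len i < len := by
  unfold pvNorm; split_ifs <;> omega

lemma pvIdx_eq (len : Nat) (i : Int) (h1 : -(len : Int) ≤ i) (h2 : i < (len : Int)) :
    PySem.List.pyIdx? len i = some (pvNorm len i) := by
  unfold PySem.List.pyIdx? pvNorm; split_ifs <;> first | rfl | omega

lemma pvGetD_eq {α : Type} (xs : List α) (i : Int) (d : α)
    (h1 : -(xs.length : Int) ≤ i) (h2 : i < (xs.length : Int)) :
    PySem.List.pyGetD xs i d = xs.getD (pvNorm xs.length i) d := by
  simp [PySem.List.pyGetD, PySem.List.pyGet?, pvIdx_eq _ _ h1 h2, List.getD_eq_getElem?_getD]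

lemma pvSetD_eq {α : Type} (xs : List α) (i : Int) (v : α)
    (h1 : -(xs.length : Int) ≤ i) (h2 : i < (xs.length : Int)) :
    PySem.List.pySetD xs i v = xs.set (pvNorm xs.length i) v := by
  simp [PySem.List.pySetD, PySem.List.pySet?, pvIdx_eq _ _ h1 h2]

-- the 'for i in range(...): xs[i] = f(i, xs[i])' loop rewrites each position in place
lemma pvSetLoop {α : Type} (d : α) (f : Int → α → α) :
    ∀ (mat pre : List α),
      (PySem.List.pyRange (pre.length : Int) ((pre.length : Int) + (mat.length : Int)) 1).foldl
        (fun ys i => PySem.List.pySetD ys i (f i (PySem.List.pyGetD ys i d))) (pre ++ mat)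
      = pre ++ mat.mapIdx (fun k r => f ((pre.length : Int) + (k : Int)) r) := by
  intro mat
  induction mat with
  | nil =>
    intro pre
    rw [PySem.List.pyRange_one_eq_nil (by simp)]
    simp
  | cons r mat ih =>
    intro pre
    rw [PySem.List.pyRange_one_cons (by rw [List.length_cons]; push_cast; omega)]
    simp only [List.foldl_cons]
    have hget : PySem.List.pyGetD (pre ++ r :: mat) ((pre.length : Int)) d = r := by
      rw [PySem.List.pyGetD_natCast, List.getD_eq_getElem?_getD,
        List.getElem?_append_right (le_refl _)]
      simp
    rw [hget]
    set w := f (pre.length : Int) r with hw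
    have hset : PySem.List.pySetD (pre ++ r :: mat) ((pre.length : Int)) w
        = (pre ++ [w]) ++ mat := by
      rw [PySem.List.pySetD_of_nonneg _ _ (by omega)]
      rw [show ((pre.length : Int)).toNat = pre.length from by simp]
      rw [List.set_append_right _ _ (le_refl _)]
      simp
    rw [hset]
    have e2 : ((pre.length : Int) + ((r :: mat).length : Int))
        = (((pre ++ [w]).length : Int) + (mat.length : Int)) := by
      simp only [List.length_cons, List.length_append, List.length_nil]
      push_cast
      ring
    have e1 : ((pre.length : Int) + 1) = (((pre ++ [w]).length : Int)) := by
      simp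
    rw [e2, e1, ih (pre ++ [w])]
    rw [show (pre ++ [w]) ++ List.mapIdx (fun k r => f (((pre ++ [w]).length : Int) + (k : Int)) r) mat
          = pre ++ (w :: List.mapIdx (fun k r => f (((pre ++ [w]).length : Int) + (k : Int)) r) mat) from by simp]
    rw [List.mapIdx_cons]
    congr 1
    congr 1
    · have e3 : (fun (k : Nat) (r : α) => f (((pre ++ [w]).length : Int) + (k : Int)) r)
          = (fun (i : Nat) (r : α) => f ((pre.length : Int) + ((i + 1 : Nat) : Int)) r) := by
        funext k r
        have e4 : (((pre ++ [w]).length : Int) + (k : Int)) = ((pre.length : Int) + ((k + 1 : Nat) : Int)) := by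
          simp only [List.length_append, List.length_cons, List.length_nil]
          push_cast
          ring
        rw [e4]
      rw [e3]

lemma pvSetLoop0 {α : Type} (d : α) (f : Int → α → α) (mat : List α) :
    (PySem.List.pyRange 0 (mat.length : Int) 1).foldl
      (fun ys i => PySem.List.pySetD ys i (f i (PySem.List.pyGetD ys i d))) mat
    = mat.mapIdx (fun k r => f (k : Int) r) := by
  have h := pvSetLoop d f mat []
  simpa using h

lemma pvRangeToNat (B : Int) :
    PySem.List.pyRange 0 B 1 = PySem.List.pyRange 0 (B.toNat : Int) 1 := by
  by_cases h : 0 ≤ B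
  · rw [Int.toNat_of_nonneg h]
  · rw [PySem.List.pyRange_one_eq_nil (by omega), PySem.List.pyRange_one_eq_nil (by omega)]

lemma pvMapIdx_replicate {α β : Type} (n : Nat) (x : α) (f : Nat → α → β) :
    (List.replicate n x).mapIdx f = (List.range n).map (fun i => f i x) := by
  apply List.ext_getElem <;> simp [List.getElem_mapIdx]

lemma pvMapIdx_map_range {β γ : Type} (n : Nat) (g : Nat → β) (f : Nat → β → γ) :
    ((List.range n).map g).mapIdx f = (List.range n).map (fun i => f i (g i)) := by
  apply List.ext_getElem <;> simp [List.getElem_mapIdx]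

lemma pvSet_map_range {β : Type} (n : Nat) (g : Nat → β) (k : Nat) (w : β) (hk : k < n) :
    ((List.range n).map g).set k w = (List.range n).map (fun i => if i = k then w else g i) := by
  apply List.ext_getElem
  · simp
  · intro i h1 h2
    simp only [List.getElem_set, List.getElem_map, List.getElem_range]
    rcases eq_or_ne i k with rfl | hne
    · simp
    · simp [hne, Ne.symm hne]

lemma pvGetD_map_range {β : Type} (n : Nat) (g : Nat → β) (k : Nat) (d : β) (hk : k < n) :
    ((List.range n).map g).getD k d = g k := by
  simp [List.getD_eq_getElem?_getD, hk]

lemma pvGetD_set (rs : List Int) (k : Nat) (w : Int) (i : Nat) (hk : k < rs.length) :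
    (rs.set k w).getD i 0 = if i = k then w else rs.getD i 0 := by
  simp only [List.getD_eq_getElem?_getD, List.getElem?_set]
  rcases eq_or_ne i k with rfl | hne
  · simp [hk]
  · simp [hne, Ne.symm hne]

-- the matrix whose (i,j) entry is rs[i] + cs[j]
def pvMk (n m : Nat) (rs cs : List Int) : List (List Int) :=
  (List.range n).map (fun i => (List.range m).map (fun j => rs.getD i 0 + cs.getD j 0))

def pvRStep (rs : List Int) (op : Int × Int × Int) : List Int :=
  if op.1 == 1 then PySem.List.pySetD rs (op.2.1 - 1) (PySem.List.pyGetD rs (op.2.1 - 1) 0 + op.2.2) else rs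
def pvCStep (cs : List Int) (op : Int × Int × Int) : List Int :=
  if op.1 == 1 then cs else PySem.List.pySetD cs (op.2.1 - 1) (PySem.List.pyGetD cs (op.2.1 - 1) 0 + op.2.2)

lemma pvRStep_len (rs : List Int) (op : Int × Int × Int) : (pvRStep rs op).length = rs.length := by
  unfold pvRStep; split <;> simp [PySem.List.length_pySetD]
lemma pvCStep_len (cs : List Int) (op : Int × Int × Int) : (pvCStep cs op).length = cs.length := by
  unfold pvCStep; split <;> simp [PySem.List.length_pySetD]
-- A's single loop over the two sum tables is the pair of the two independent folds
lemma pvPairFold (ops : List (Int × Int × Int)) : ∀ (a b : List Int),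
    ops.foldl
      (fun (s : List Int × List Int) op =>
        if op.1 == 1 then
          (PySem.List.pySetD s.1 (op.2.1 - 1) (PySem.List.pyGetD s.1 (op.2.1 - 1) 0 + op.2.2), s.2)
        else
          (s.1, PySem.List.pySetD s.2 (op.2.1 - 1) (PySem.List.pyGetD s.2 (op.2.1 - 1) 0 + op.2.2)))
      (a, b)
    = (ops.foldl pvRStep a, ops.foldl pvCStep b) := by
  induction ops with
  | nil => intro a b; rfl
  | cons op ops ih =>
    intro a b
    simp only [List.foldl_cons]
    by_cases h : op.1 = 1
    · have hb : (op.1 == 1) = true := by simpa using h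
      rw [if_pos hb,
        show pvRStep a op = PySem.List.pySetD a (op.2.1 - 1) (PySem.List.pyGetD a (op.2.1 - 1) 0 + op.2.2) from by
          unfold pvRStep; rw [if_pos hb],
        show pvCStep b op = b from by unfold pvCStep; rw [if_pos hb]]
      exact ih _ _
    · have hb : (op.1 == 1) = false := by simpa using h
      rw [if_neg (by simp [hb]),
        show pvRStep a op = a from by unfold pvRStep; rw [if_neg (by simp [hb])],
        show pvCStep b op = PySem.List.pySetD b (op.2.1 - 1) (PySem.List.pyGetD b (op.2.1 - 1) 0 + op.2.2) from by
          unfold pvCStep; rw [if_neg (by simp [hb])]]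
      exact ih _ _

-- A's final double loop fills the matrix with row_sum[i] + col_sum[j]
lemma pvAFill (N M : Int) (rs cs : List Int) :
    (PySem.List.pyRange 0 N 1).foldl
      (fun mat i =>
        PySem.List.pySetD mat i
          ((PySem.List.pyRange 0 M 1).foldl
            (fun row j => PySem.List.pySetD row j (PySem.List.pyGetD rs i 0 + PySem.List.pyGetD cs j 0))
            (PySem.List.pyGetD mat i [])))
      (List.replicate N.toNat (List.replicate M.toNat (0 : Int)))
    = pvMk N.toNat M.toNat rs cs := by
  rw [pvRangeToNat N,
    show ((N.toNat : Int)) = ((List.replicate N.toNat (List.replicate M.toNat (0 : Int))).length : Int) from by simp,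
    pvSetLoop0 ([] : List Int)
      (fun i row => (PySem.List.pyRange 0 M 1).foldl
        (fun row2 j => PySem.List.pySetD row2 j (PySem.List.pyGetD rs i 0 + PySem.List.pyGetD cs j 0)) row),
    pvMapIdx_replicate]
  unfold pvMk
  apply List.map_congr_left
  intro i hi
  dsimp only
  rw [pvRangeToNat M,
    show ((M.toNat : Int)) = ((List.replicate M.toNat (0 : Int)).length : Int) from by simp,
    pvSetLoop0 (0 : Int) (fun j _ => PySem.List.pyGetD rs (i : Int) 0 + PySem.List.pyGetD cs j 0),
    pvMapIdx_replicate]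
  simp [PySem.List.pyGetD_natCast]

-- B's row operation on a sum-structured matrix updates the row table
lemma pvBRow (n m : Nat) (rs cs : List Int) (hr : rs.length = n) (hc : cs.length = m)
    (x v : Int) (h1 : -(n : Int) ≤ x - 1) (h2 : x - 1 < (n : Int)) :
    PySem.List.pySetD (pvMk n m rs cs) (x - 1)
      ((PySem.List.pyGetD (pvMk n m rs cs) (x - 1) []).map (fun e => e + v))
    = pvMk n m (PySem.List.pySetD rs (x - 1) (PySem.List.pyGetD rs (x - 1) 0 + v)) cs := by
  have hlen : (pvMk n m rs cs).length = n := by simp [pvMk]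
  have hk : pvNorm n (x - 1) < n := pvNorm_lt n (x - 1) h1 h2
  rw [pvGetD_eq (pvMk n m rs cs) (x - 1) [] (by rw [hlen]; exact h1) (by rw [hlen]; exact h2),
    pvSetD_eq (pvMk n m rs cs) (x - 1) _ (by rw [hlen]; exact h1) (by rw [hlen]; exact h2),
    pvSetD_eq rs (x - 1) _ (by rw [hr]; exact h1) (by rw [hr]; exact h2),
    pvGetD_eq rs (x - 1) 0 (by rw [hr]; exact h1) (by rw [hr]; exact h2),
    hlen, hr]
  unfold pvMk
  rw [pvGetD_map_range _ _ _ _ hk, List.map_map, pvSet_map_range _ _ _ _ hk]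
  apply List.map_congr_left
  intro i hi
  rw [pvGetD_set rs (pvNorm n (x - 1)) _ i (by rw [hr]; exact hk)]
  rcases eq_or_ne i (pvNorm n (x - 1)) with rfl | hik
  · rw [if_pos rfl, if_pos rfl]
    apply List.map_congr_left
    intro j hj
    simp only [Function.comp_apply]
    ring
  · rw [if_neg hik, if_neg hik]

-- B's column operation on a sum-structured matrix updates the column table
lemma pvBCol (N : Int) (m : Nat) (rs cs : List Int) (hr : rs.length = N.toNat) (hc : cs.length = m)
    (x v : Int) (h1 : -(m : Int) ≤ x - 1) (h2 : x - 1 < (m : Int)) :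
    (PySem.List.pyRange 0 N 1).foldl
      (fun mat2 i =>
        PySem.List.pySetD mat2 i
          (PySem.List.pySetD (PySem.List.pyGetD mat2 i []) (x - 1)
            (PySem.List.pyGetD (PySem.List.pyGetD mat2 i []) (x - 1) 0 + v)))
      (pvMk N.toNat m rs cs)
    = pvMk N.toNat m rs (PySem.List.pySetD cs (x - 1) (PySem.List.pyGetD cs (x - 1) 0 + v)) := by
  have hk : pvNorm m (x - 1) < m := pvNorm_lt m (x - 1) h1 h2
  rw [pvRangeToNat N,
    show ((N.toNat : Int)) = ((pvMk N.toNat m rs cs).length : Int) from by simp [pvMk],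
    pvSetLoop0 ([] : List Int)
      (fun _ row => PySem.List.pySetD row (x - 1) (PySem.List.pyGetD row (x - 1) 0 + v))]
  rw [pvSetD_eq cs (x - 1) _ (by rw [hc]; exact h1) (by rw [hc]; exact h2),
    pvGetD_eq cs (x - 1) 0 (by rw [hc]; exact h1) (by rw [hc]; exact h2), hc]
  unfold pvMk
  rw [pvMapIdx_map_range]
  apply List.map_congr_left
  intro i hi
  dsimp only
  rw [pvGetD_eq _ (x - 1) 0 (by simpa using h1) (by simpa using h2),
    pvSetD_eq _ (x - 1) _ (by simpa using h1) (by simpa using h2)]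
  simp only [List.length_map, List.length_range]
  rw [pvGetD_map_range _ _ _ _ hk, pvSet_map_range _ _ _ _ hk]
  apply List.map_congr_left
  intro j hj
  rw [pvGetD_set cs (pvNorm m (x - 1)) _ j (by rw [hc]; exact hk)]
  rcases eq_or_ne j (pvNorm m (x - 1)) with rfl | hjk
  · rw [if_pos rfl, if_pos rfl]; ring
  · rw [if_neg hjk, if_neg hjk]

-- B's loop over the operations keeps the matrix in sum form
lemma pvBInv (N M : Int) (ops : List (Int × Int × Int)) :
    ∀ rs cs : List Int, rs.length = N.toNat → cs.length = M.toNat →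
    (∀ op ∈ ops,
      (op.1 = 1 → -(N.toNat : Int) ≤ op.2.1 - 1 ∧ op.2.1 - 1 < (N.toNat : Int)) ∧
      (op.1 ≠ 1 → -(M.toNat : Int) ≤ op.2.1 - 1 ∧ op.2.1 - 1 < (M.toNat : Int))) →
    ops.foldl (pvBOp N) (pvMk N.toNat M.toNat rs cs)
    = pvMk N.toNat M.toNat (ops.foldl pvRStep rs) (ops.foldl pvCStep cs) := by
  induction ops with
  | nil => intro rs cs _ _ _; rfl
  | cons op ops ih =>
    intro rs cs hr hc hpre
    simp only [List.foldl_cons]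
    have hstep : pvBOp N (pvMk N.toNat M.toNat rs cs) op
        = pvMk N.toNat M.toNat (pvRStep rs op) (pvCStep cs op) := by
      by_cases h : op.1 = 1
      · have hb : (op.1 == 1) = true := by simpa using h
        have hx := (hpre op (by simp)).1 h
        unfold pvBOp pvRStep pvCStep
        rw [if_pos hb, if_pos hb, if_pos hb]
        exact pvBRow N.toNat M.toNat rs cs hr hc op.2.1 op.2.2 hx.1 hx.2
      · have hb : (op.1 == 1) = false := by simpa using h
        have hx := (hpre op (by simp)).2 h
        unfold pvBOp pvRStep pvCStep
        rw [if_neg (by simp [hb]), if_neg (by simp [hb]), if_neg (by simp [hb])]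
        exact pvBCol N M.toNat rs cs hr hc op.2.1 op.2.2 hx.1 hx.2
    rw [hstep]
    exact ih (pvRStep rs op) (pvCStep cs op) (by rw [pvRStep_len, hr]) (by rw [pvCStep_len, hc])
      (fun o ho => hpre o (List.mem_cons_of_mem _ ho))

-- the initial zero matrix is the sum form of the zero tables
lemma pvMkZero (n m : Nat) :
    List.replicate n (List.replicate m (0 : Int)) = pvMk n m (List.replicate n 0) (List.replicate m 0) := by
  unfold pvMk
  apply List.ext_getElem
  · simp
  · intro i h1 h2
    have hi : i < n := by simpa using h2
    simp only [List.getElem_replicate, List.getElem_map, List.getElem_range]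
    apply List.ext_getElem
    · simp
    · intro j hj1 hj2
      have hj : j < m := by simpa using hj2
      simp only [List.getElem_replicate, List.getElem_map, List.getElem_range]
      rw [List.getD_replicate _ hi, List.getD_replicate _ hj]
      norm_num

-- ===== VERDICT (by name: the statement is the Claim_ definition above) =====
theorem matrix_operations_spec : Claim_equal_matrix_operations := by
  intro N M Q ops hDom hPre
  unfold Pre_matrix_operations at hPre
  unfold Spec_matrix_operations matrix_operations matrix_operations_alt
  dsimp only
  rw [pvPairFold]
  dsimp only
  rw [pvAFill N M _ _, pvMkZero N.toNat M.toNat,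
    pvBInv N M ops _ _ (by simp) (by simp) hPre]
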